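-- pv_equiv track=rewrite | github.com/ilkerkesen/pixel-m4 | scripts/data/preprocess_mc4.py | string_to_ngrams_sep_wspace
-- ===== SOURCE A (Python) =====
-- def string_to_ngrams_sep_wspace(s:str, n:int=2) -> list:
--     """
--     Takes a string and returns a list of character n-grams by splitting `s` on every `n` character,
--     with whitespace included as separate elements.
--     Args:
--         s (str): The input string to be converted to bigrams.
--         n (int): The frequency of which the input string is split. Defaults to `n`=2
--     Returns:
--         list: A list of character n-grams.
--     TODO
--         [x] speed test => `while` loop is faster (~50%) than *nested* list comprehension
--     """
--     bigrams = []
--     i = 0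
--     while i < len(s):
--         if s[i] == ' ':
--             bigrams.append(s[i])
--             i += 1
--         else:
--             bigram = s[i:i + n]
--             if ' ' in bigram:
--                 bigrams.append(s[i])
--                 i += 1
--             else:
--                 bigrams.append(bigram)
--                 i += n
--     return bigrams
-- ===== SOURCE B (Python) =====
-- def string_to_ngrams_sep_wspace(s: str, n: int = 2) -> list:
--     parts = s.split(' ')
--     out = []
--     for part in parts[:-1]:
--         r = len(part) % n
--         out.extend(part[j:j + n] for j in range(0, len(part) - r, n))
--         out.extend(part[len(part) - r:])
--         out.append(' ')
--     last = parts[-1]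
--     out.extend(last[j:j + n] for j in range(0, len(last), n))
--     return out
-- ===== Notes on version B (the rewrite author's own statement) =====
-- stated objective: alternative
-- what changed: replaces A's space-probing while loop over a running index by splitting the string on the single-space separator and chunking each part arithmetically (range slicing: full n-grams plus the mod-n remainder as single chars for non-final parts, partial tail kept for the last part), reinserting one space element between parts
-- outside the precondition, e.g. on string_to_ngrams_sep_wspace('  ', 0): A returns [' ', ' '], B raises ZeroDivisionError; on string_to_ngrams_sep_wspace('', 0): A returns [], B raises ValueError
import Mathlib
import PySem

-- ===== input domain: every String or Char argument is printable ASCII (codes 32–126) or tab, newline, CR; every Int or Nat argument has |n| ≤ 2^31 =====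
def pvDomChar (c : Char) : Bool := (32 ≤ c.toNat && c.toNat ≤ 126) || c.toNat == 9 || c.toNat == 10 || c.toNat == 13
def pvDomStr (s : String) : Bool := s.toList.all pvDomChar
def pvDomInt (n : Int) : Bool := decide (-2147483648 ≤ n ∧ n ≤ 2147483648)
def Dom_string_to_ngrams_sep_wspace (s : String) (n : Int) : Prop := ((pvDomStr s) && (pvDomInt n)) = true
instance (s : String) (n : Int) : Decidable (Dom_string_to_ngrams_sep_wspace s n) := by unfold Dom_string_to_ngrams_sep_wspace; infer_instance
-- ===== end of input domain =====

-- B replaces A's index-advancing while loop (which probes every window for a space) by splitting on the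
-- space separator, then arithmetic n-gram slicing of each part; same cost, different decomposition (objective: alternative).

-- ===== PORT A =====
-- while-loop of A with state (i, bigrams); fuel = len(s) suffices: inside Pre_ (1 ≤ n) every
-- iteration advances i by at least 1, so the loop runs at most len(s) times.
def pvALoop (cs : List Char) (n : Int) : Nat → Nat → List String → List String
  | 0, _, acc => acc.reverse
  | fuel+1, i, acc =>
    if h : i < cs.length then
      if cs[i] = ' ' then
        pvALoop cs n fuel (i+1) (String.ofList [cs[i]] :: acc)
      else if ' ' ∈ PySem.List.slice cs (some (i : Int)) (some ((i : Int) + n)) then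
        pvALoop cs n fuel (i+1) (String.ofList [cs[i]] :: acc)
      else
        pvALoop cs n fuel (i + n.toNat) (String.ofList (PySem.List.slice cs (some (i : Int)) (some ((i : Int) + n))) :: acc)
    else acc.reverse

def string_to_ngrams_sep_wspace (s : String) (n : Int) : List String :=
  pvALoop s.toList n s.toList.length 0 []

-- ===== PORT B =====
-- [part[j:j+n] for j in range(0, b, n)]
def pvNgramSlices (p : List Char) (b n : Int) : List String :=
  (PySem.List.pyRange 0 b n).map (fun j => String.ofList (PySem.List.slice p (some j) (some (j + n))))

def string_to_ngrams_sep_wspace_alt (s : String) (n : Int) : List String :=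
  let parts := PySem.Chars.splitOn s.toList [' ']
  let out := (PySem.List.slice parts none (some (-1))).foldl
    (fun out part =>
      ((out ++ pvNgramSlices part ((part.length : Int) - PySem.Int.mod (part.length : Int) n) n)
          ++ (PySem.List.slice part (some ((part.length : Int) - PySem.Int.mod (part.length : Int) n)) none).map
              (fun c => String.ofList [c]))
        ++ [String.ofList [' ']]) []
  match PySem.List.pyGet? parts (-1) with
  | some lastPart => out ++ pvNgramSlices lastPart (lastPart.length : Int) n
  | none => out

-- ===== PRECONDITION & SPEC =====
-- Pre_ excludes n = 0 (A loops forever unless s is all spaces — where it returns the spaces but B's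
-- 0 % n / range(..., 0) raises ZeroDivisionError/ValueError) and n < 0 on strings with a non-space
-- character (there A loops forever or hits an IndexError from the ever-decreasing index).
def Pre_string_to_ngrams_sep_wspace (s : String) (n : Int) : Prop :=
  1 ≤ n ∨ (n ≤ -1 ∧ ∀ c ∈ s.toList, c = ' ')
instance (s : String) (n : Int) : Decidable (Pre_string_to_ngrams_sep_wspace s n) := by unfold Pre_string_to_ngrams_sep_wspace; infer_instance
def pvWitness_string_to_ngrams_sep_wspace : String × Int := ("ab cde", 2)

def Spec_string_to_ngrams_sep_wspace (s : String) (n : Int) (out : List String) : Prop := out = string_to_ngrams_sep_wspace_alt s n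
instance (s : String) (n : Int) (out : List String) : Decidable (Spec_string_to_ngrams_sep_wspace s n out) := by unfold Spec_string_to_ngrams_sep_wspace; infer_instance

-- ===== CLAIM (what is proved, stated in full; the proofs are below) =====
def Claim_equal_string_to_ngrams_sep_wspace : Prop := ∀ (s : String) (n : Int), Dom_string_to_ngrams_sep_wspace s n → Pre_string_to_ngrams_sep_wspace s n → Spec_string_to_ngrams_sep_wspace s n (string_to_ngrams_sep_wspace s n)

-- ===== LEMMAS AND PROOFS =====

-- common spec: chunk a list into (m+1)-grams, last chunk possibly short
def pvChunk (m : Nat) : List Char → List String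
  | [] => []
  | c :: cs => String.ofList ((c :: cs).take (m+1)) :: pvChunk m ((c :: cs).drop (m+1))
  termination_by l => l.length
  decreasing_by all_goals simp

-- spec of a part followed by a space: full (m+1)-grams, then the remainder as single chars
def pvMidSpec (m : Nat) (p : List Char) : List String :=
  pvChunk m (p.take (p.length - p.length % (m+1))) ++ (p.drop (p.length - p.length % (m+1))).map (fun c => String.ofList [c])

-- structural form of A's loop (valid for n = m+1 ≥ 1)
def pvASpec (m : Nat) : List Char → List String
  | [] => []
  | c :: cs =>
    if c = ' ' then String.ofList [c] :: pvASpec m cs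
    else if ' ' ∈ (c :: cs).take (m+1) then String.ofList [c] :: pvASpec m cs
    else String.ofList ((c :: cs).take (m+1)) :: pvASpec m ((c :: cs).drop (m+1))
  termination_by l => l.length
  decreasing_by all_goals simp

-- structural form of str.split(' ')
def pvSplit : List Char → List (List Char)
  | [] => [[]]
  | c :: cs => if c = ' ' then [] :: pvSplit cs else (pvSplit cs).modifyHead (c :: ·)

-- join the split parts back: middle parts via pvMidSpec + a space, last part fully chunked
def pvJoin (m : Nat) : List (List Char) → List String
  | [] => []
  | [p] => pvChunk m p
  | p :: q :: ps => pvMidSpec m p ++ String.ofList [' '] :: pvJoin m (q :: ps)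

theorem pvModifyHead_fun_id {α : Type} (l : List α) : List.modifyHead (fun x => x) l = l := by
  cases l <;> rfl

theorem pvSplit_length_pos (cs : List Char) : 0 < (pvSplit cs).length := by
  induction cs with
  | nil => simp [pvSplit]
  | cons c cs ih => by_cases hc : c = ' ' <;> simp [pvSplit, hc, ih]

theorem pvSplit_ne_nil (cs : List Char) : pvSplit cs ≠ [] :=
  List.ne_nil_of_length_pos (pvSplit_length_pos cs)

theorem pvGo_eq (fuel : Nat) : ∀ (l cur : List Char) (acc : List (List Char)), l.length < fuel →
    PySem.Chars.splitOn.go [' '] fuel l cur acc = acc.reverse ++ (pvSplit l).modifyHead (cur.reverse ++ ·) := by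
  induction fuel with
  | zero => intro l cur acc h; omega
  | succ fuel ih =>
    intro l cur acc h
    match l with
    | [] => simp [PySem.Chars.splitOn.go, pvSplit]
    | c :: rest =>
      by_cases hc : c = ' '
      · subst hc
        rw [PySem.Chars.splitOn.go]
        have hp : [' '].isPrefixOf (' ' :: rest) = true := by simp [List.isPrefixOf]
        simp only [hp, if_true, show ([' '] : List Char).length = 1 from rfl, List.drop_succ_cons, List.drop_zero]
        rw [ih rest [] _ (by simpa using h)]
        simp [pvSplit, pvModifyHead_fun_id]
      · rw [PySem.Chars.splitOn.go]
        have hp : [' '].isPrefixOf (c :: rest) = false := by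
          simp [List.isPrefixOf]; exact fun hh => (hc hh.symm).elim
        simp only [hp]
        rw [ih rest (c :: cur) _ (by simpa using h)]
        simp only [pvSplit, hc, if_false, List.modifyHead_modifyHead]
        obtain ⟨h0, t0, he⟩ := List.exists_cons_of_ne_nil (pvSplit_ne_nil rest)
        simp [he, Function.comp]

theorem pvSplitOn_eq (cs : List Char) : PySem.Chars.splitOn cs [' '] = pvSplit cs := by
  rw [PySem.Chars.splitOn, pvGo_eq _ _ _ _ (by omega)]
  simp only [List.reverse_nil, List.nil_append, pvModifyHead_fun_id]

theorem pvSplit_nospace (p : List Char) (h : ' ' ∉ p) : pvSplit p = [p] := by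
  induction p with
  | nil => rfl
  | cons c cs ih =>
    have hc : ¬ c = ' ' := fun hh => h (hh ▸ List.mem_cons_self)
    rw [pvSplit]
    simp only [hc, if_false, ih (fun hm => h (List.mem_cons_of_mem _ hm))]
    rfl

theorem pvSplit_append (p rest : List Char) (h : ' ' ∉ p) :
    pvSplit (p ++ ' ' :: rest) = p :: pvSplit rest := by
  induction p with
  | nil => simp [pvSplit]
  | cons c cs ih =>
    have hc : ¬ c = ' ' := fun hh => h (hh ▸ List.mem_cons_self)
    rw [List.cons_append, pvSplit]
    simp only [hc, if_false, ih (fun hm => h (List.mem_cons_of_mem _ hm))]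
    rfl

theorem pvGetNegOne {α : Type} (xs : List α) (h : xs ≠ []) : PySem.List.pyGet? xs (-1) = xs.getLast? := by
  have hl : xs.length ≠ 0 := by simpa using h
  have h1 : (1:Int) ≤ xs.length := by omega
  simp [PySem.List.pyGet?, PySem.List.pyIdx?, List.getLast?_eq_getElem?, h1]

theorem pvRange_nil (a b s : Int) (hs : 0 < s) (h : b ≤ a) : PySem.List.pyRange a b s = [] := by
  rw [PySem.List.pyRange_of_pos a b hs]
  simp [show ¬ a < b by omega]

theorem pvRange_cons (a b s : Int) (hs : 0 < s) (h : a < b) :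
    PySem.List.pyRange a b s = a :: PySem.List.pyRange (a + s) b s := by
  rw [PySem.List.pyRange_of_pos a b hs, PySem.List.pyRange_of_pos (a+s) b hs]
  have key : ((b - a + s - 1) / s).toNat = (if a + s < b then ((b - (a + s) + s - 1) / s).toNat else 0) + 1 := by
    have he : b - a + s - 1 = (b - a - 1) + 1 * s := by ring
    have h2 : (b - a + s - 1) / s = (b - a - 1) / s + 1 := by
      rw [he, Int.add_mul_ediv_right _ _ (by omega)]
    by_cases hb : a + s < b
    · have he2 : b - (a + s) + s - 1 = b - a - 1 := by ring
      have hnn : 0 ≤ (b - a - 1) / s := Int.ediv_nonneg (by omega) (by omega)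
      rw [h2, he2]
      simp only [hb, if_true]
      omega
    · have h0 : (b - a - 1) / s = 0 := Int.ediv_eq_zero_of_lt (by omega) (by omega)
      rw [h2, h0]
      simp [hb]
  rw [if_pos h, key, List.range_succ_eq_map]
  simp only [List.map_cons, List.map_map]
  congr 1
  · push_cast; ring
  apply List.map_congr_left
  intro x _
  simp only [Function.comp]
  push_cast
  ring

-- the (m+1)-gram comprehension over a whole list is pvChunk
theorem pvChunkAux (m : Nat) (q : List Char) : ∀ (k a : Nat), q.length - a ≤ k →
    (PySem.List.pyRange (a : Int) (q.length : Int) ((m : Int)+1)).map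
      (fun j => String.ofList (PySem.List.slice q (some j) (some (j + ((m : Int)+1))))) =
    pvChunk m (q.drop a) := by
  intro k
  induction k with
  | zero =>
    intro a ha
    have h1 : q.length ≤ a := by omega
    rw [pvRange_nil _ _ _ (by omega) (by exact_mod_cast h1)]
    rw [List.drop_eq_nil_of_le h1, pvChunk]
    rfl
  | succ k ih =>
    intro a ha
    by_cases hlt : a < q.length
    · rw [pvRange_cons _ _ _ (by omega) (by exact_mod_cast hlt)]
      have hcast : ((a : Int) + ((m : Int) + 1)) = ((a + (m+1) : Nat) : Int) := by push_cast; ring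
      rw [List.map_cons]
      have hdrop : q.drop a = q[a] :: q.drop (a+1) := List.drop_eq_getElem_cons hlt
      rw [hdrop]
      rw [pvChunk]
      congr 1
      · rw [show ((a:Int) + ((m:Int)+1)) = ((a:Int) + (((m+1 : Nat)):Int)) by push_cast; ring,
            PySem.List.slice_natCast_add, ← hdrop]
      · rw [hcast, ih (a + (m+1)) (by omega)]
        rw [← hdrop, List.drop_drop]
    · rw [pvRange_nil _ _ _ (by omega) (by exact_mod_cast (by omega : q.length ≤ a))]
      rw [List.drop_eq_nil_of_le (by omega : q.length ≤ a), pvChunk]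
      rfl

theorem pvLast_eq (m : Nat) (p : List Char) :
    pvNgramSlices p (p.length : Int) ((m : Int)+1) = pvChunk m p := by
  have h := pvChunkAux m p p.length 0 (by omega)
  simpa [pvNgramSlices] using h

theorem pvMul_le_of_lt {m u v : Nat} (h : (m+1) * u < (m+1) * v) : (m+1) * u + (m+1) ≤ (m+1) * v := by
  have huv : u < v := Nat.lt_of_mul_lt_mul_left h
  calc (m+1) * u + (m+1) = (m+1) * (u+1) := by ring
    _ ≤ (m+1) * v := Nat.mul_le_mul_left _ huv

theorem pvMid_chunks_eq (m : Nat) (p : List Char) :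
    pvNgramSlices p ((p.length : Int) - PySem.Int.mod (p.length : Int) ((m : Int)+1)) ((m : Int)+1)
      = pvChunk m (p.take (p.length - p.length % (m+1))) := by
  have hmod : PySem.Int.mod (p.length : Int) ((m : Int)+1) = ((p.length % (m+1) : Nat) : Int) := by
    rw [show ((m : Int)+1) = (((m+1 : Nat)) : Int) by push_cast; ring]
    exact PySem.Int.mod_natCast _ _
  have hble : p.length % (m+1) ≤ p.length := Nat.mod_le _ _
  have hsub : (p.length : Int) - ((p.length % (m+1) : Nat) : Int) = ((p.length - p.length % (m+1) : Nat) : Int) := by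
    omega
  set B := p.length - p.length % (m+1) with hB
  have hdvd : (m+1) ∣ B := by
    have := Nat.div_add_mod p.length (m+1)
    exact ⟨p.length / (m+1), by omega⟩
  have hqlen : (p.take B).length = B := by
    simp [List.length_take]; omega
  have hcongr : ∀ j ∈ PySem.List.pyRange 0 (B : Int) ((m : Int)+1),
      String.ofList (PySem.List.slice p (some j) (some (j + ((m : Int)+1)))) =
      String.ofList (PySem.List.slice (p.take B) (some j) (some (j + ((m : Int)+1)))) := by
    intro j hj
    rw [PySem.List.mem_pyRange_iff_of_pos (by omega)] at hj
    obtain ⟨hj0, hjB, hjd⟩ := hj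
    obtain ⟨u, hu⟩ := hjd
    have hu' : j = ((m : Int)+1) * u := by omega
    have hu0 : (0:Int) ≤ u := by nlinarith
    have hju : j = ((((m+1) * u.toNat : Nat)) : Int) := by
      push_cast [Int.toNat_of_nonneg hu0]
      linarith [hu']
    obtain ⟨v, hv⟩ := hdvd
    have hlt2 : (m+1) * u.toNat < B := by
      rw [hju] at hjB
      exact_mod_cast hjB
    have hle : (m+1) * u.toNat + (m+1) ≤ B := by
      rw [hv] at hlt2 ⊢
      exact pvMul_le_of_lt hlt2
    rw [hju, show ((((m+1) * u.toNat : Nat)) : Int) + ((m : Int)+1)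
          = (((m+1) * u.toNat + (m+1) : Nat) : Int) by push_cast; ring]
    rw [show (((((m+1) * u.toNat + (m+1)) : Nat)) : Int) = ((((m+1) * u.toNat : Nat)) : Int) + (((m+1 : Nat)) : Int) by push_cast; ring]
    rw [PySem.List.slice_natCast_add, PySem.List.slice_natCast_add]
    rw [List.drop_take]
    rw [List.take_take]
    rw [Nat.min_eq_left (by omega)]
  rw [pvNgramSlices, hmod, hsub, List.map_congr_left hcongr]
  have h := pvChunkAux m (p.take B) (p.take B).length 0 (by omega)
  simp only [List.drop_zero] at h
  rw [hqlen] at h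
  exact h

theorem pvMid_tail_eq (m : Nat) (p : List Char) :
    PySem.List.slice p (some ((p.length : Int) - PySem.Int.mod (p.length : Int) ((m : Int)+1))) none
      = p.drop (p.length - p.length % (m+1)) := by
  have hmod : PySem.Int.mod (p.length : Int) ((m : Int)+1) = ((p.length % (m+1) : Nat) : Int) := by
    rw [show ((m : Int)+1) = (((m+1 : Nat)) : Int) by push_cast; ring]
    exact PySem.Int.mod_natCast _ _
  have hble : p.length % (m+1) ≤ p.length := Nat.mod_le _ _
  rw [hmod, show (p.length : Int) - ((p.length % (m+1) : Nat) : Int) = ((p.length - p.length % (m+1) : Nat) : Int) by omega]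
  exact PySem.List.slice_from_natCast _ _

theorem pvChunk_nil (m : Nat) : pvChunk m [] = [] := by rw [pvChunk]

theorem pvJoin_eq (m : Nat) : ∀ (ps : List (List Char)) (p : List Char),
    ((p :: ps).dropLast).flatMap (fun q => pvMidSpec m q ++ [String.ofList [' ']])
        ++ pvChunk m ((p :: ps).getLast (by simp)) = pvJoin m (p :: ps) := by
  intro ps
  induction ps with
  | nil => intro p; simp [pvJoin]
  | cons q ps ih =>
    intro p
    rw [pvJoin]
    rw [show (p :: q :: ps).dropLast = p :: (q :: ps).dropLast from rfl]
    rw [List.flatMap_cons]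
    rw [List.getLast_cons (by simp : (q :: ps) ≠ [])]
    rw [List.append_assoc]
    rw [ih q]
    simp

theorem pvB_main (s : String) (m : Nat) :
    string_to_ngrams_sep_wspace_alt s ((m : Int)+1) = pvJoin m (pvSplit s.toList) := by
  unfold string_to_ngrams_sep_wspace_alt
  rw [pvSplitOn_eq]
  obtain ⟨p, ps, hpp⟩ := List.exists_cons_of_ne_nil (pvSplit_ne_nil s.toList)
  rw [hpp]
  simp only []
  rw [PySem.List.slice_to_neg_one]
  rw [pvGetNegOne _ (List.cons_ne_nil p ps)]
  rw [List.getLast?_eq_some_getLast (h := List.cons_ne_nil p ps)]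
  have hbody : (fun (out : List String) (part : List Char) =>
        ((out ++ pvNgramSlices part ((part.length : Int) - PySem.Int.mod (part.length : Int) ((m : Int)+1)) ((m : Int)+1))
            ++ (PySem.List.slice part (some ((part.length : Int) - PySem.Int.mod (part.length : Int) ((m : Int)+1))) none).map
                (fun c => String.ofList [c]))
          ++ [String.ofList [' ']])
      = fun (out : List String) (part : List Char) => out ++ (pvMidSpec m part ++ [String.ofList [' ']]) := by
    funext out part
    rw [pvMid_chunks_eq, pvMid_tail_eq]
    simp [pvMidSpec, List.append_assoc]
  rw [hbody, PySem.List.foldl_append_eq_flatMap]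
  simp only [pvLast_eq, List.nil_append]
  exact pvJoin_eq m ps p

theorem pvALoop_eq (m : Nat) (cs : List Char) : ∀ (fuel i : Nat) (acc : List String),
    cs.length ≤ fuel + i →
    pvALoop cs ((m : Int)+1) fuel i acc = acc.reverse ++ pvASpec m (cs.drop i) := by
  intro fuel
  induction fuel with
  | zero =>
    intro i acc h
    rw [pvALoop, List.drop_eq_nil_of_le (by omega), pvASpec]
    simp
  | succ fuel ih =>
    intro i acc h
    rw [pvALoop]
    by_cases hi : i < cs.length
    · rw [dif_pos hi]
      have hdrop : cs.drop i = cs[i] :: cs.drop (i+1) := List.drop_eq_getElem_cons hi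
      have hslice : PySem.List.slice cs (some (i : Int)) (some ((i : Int) + ((m : Int)+1)))
          = (cs.drop i).take (m+1) := by
        rw [show ((i : Int) + ((m : Int)+1)) = ((i : Int) + (((m+1 : Nat)) : Int)) by push_cast; ring]
        exact PySem.List.slice_natCast_add _ _ _
      have htoNat : ((m : Int)+1).toNat = m+1 := by omega
      by_cases hc : cs[i] = ' '
      · rw [if_pos hc, ih (i+1) _ (by omega), hdrop, pvASpec, if_pos hc]
        simp
      · rw [if_neg hc]
        by_cases hw : ' ' ∈ (cs.drop i).take (m+1)
        · rw [if_pos (hslice ▸ hw), ih (i+1) _ (by omega), hdrop, pvASpec, if_neg hc]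
          rw [if_pos (hdrop ▸ hw)]
          simp
        · rw [if_neg (fun hx => hw (hslice ▸ hx))]
          rw [htoNat, ih (i + (m+1)) _ (by omega), hdrop, pvASpec, if_neg hc]
          rw [if_neg (fun hx => hw (hdrop ▸ hx))]
          rw [hslice, hdrop]
          have hdd : cs.drop (i + (m+1)) = (cs[i] :: cs.drop (i+1)).drop (m+1) := by
            rw [← hdrop, List.drop_drop]
          rw [hdd]
          simp
    · rw [dif_neg hi, List.drop_eq_nil_of_le (by omega), pvASpec]
      simp

theorem pvA_main (s : String) (m : Nat) :
    string_to_ngrams_sep_wspace s ((m : Int)+1) = pvASpec m s.toList := by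
  unfold string_to_ngrams_sep_wspace
  rw [pvALoop_eq m s.toList s.toList.length 0 [] (by omega)]
  simp

theorem pvASpec_nospace (m : Nat) : ∀ (k : Nat) (p : List Char), p.length ≤ k → ' ' ∉ p →
    pvASpec m p = pvChunk m p := by
  intro k
  induction k with
  | zero =>
    intro p hlen _
    obtain rfl : p = [] := List.eq_nil_of_length_eq_zero (by omega)
    rw [pvASpec, pvChunk]
  | succ k ih =>
    intro p hlen hsp
    match p with
    | [] => rw [pvASpec, pvChunk]
    | c :: p' =>
      have hc : ¬ c = ' ' := fun hh => hsp (hh ▸ List.mem_cons_self)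
      have hw : ' ' ∉ (c :: p').take (m+1) := fun hm => hsp (List.mem_of_mem_take hm)
      rw [pvASpec, if_neg hc, if_neg hw, pvChunk]
      congr 1
      exact ih _ (by simp only [List.length_drop, List.length_cons] at hlen ⊢; omega) (fun hm => hsp (List.mem_of_mem_drop hm))

theorem pvMid_small (m : Nat) (p : List Char) (h : p.length ≤ m) :
    pvMidSpec m p = p.map (fun c => String.ofList [c]) := by
  rw [pvMidSpec, Nat.mod_eq_of_lt (by omega), Nat.sub_self]
  simp [pvChunk_nil]

theorem pvMid_cons (m : Nat) (c : Char) (p' : List Char) (hbig : m + 1 ≤ (c :: p').length) :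
    pvMidSpec m (c :: p') = String.ofList ((c :: p').take (m+1)) :: pvMidSpec m ((c :: p').drop (m+1)) := by
  set p : List Char := c :: p' with hp
  set L := p.length with hL
  set r := L % (m+1) with hr
  have hrlt : r < m+1 := Nat.mod_lt _ (by omega)
  have hdvd : (m+1) ∣ (L - r) := by
    have := Nat.div_add_mod L (m+1)
    exact ⟨L / (m+1), by omega⟩
  have h1 : 1 ≤ L / (m+1) := (Nat.one_le_div_iff (by omega)).mpr hbig
  have hBge : m + 1 ≤ L - r := by
    have := Nat.div_add_mod L (m+1)
    obtain ⟨v, hv⟩ := hdvd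
    have hv1 : 1 ≤ v := by
      rcases Nat.eq_zero_or_pos v with h0 | h0
      · exfalso; rw [h0, Nat.mul_zero] at hv; omega
      · exact h0
    calc m + 1 = (m+1) * 1 := by ring
      _ ≤ (m+1) * v := Nat.mul_le_mul_left _ hv1
      _ = L - r := hv.symm
  -- length of the dropped part
  have hlen2 : (p.drop (m+1)).length = L - (m+1) := by simp [hL]
  have hr2 : (p.drop (m+1)).length % (m+1) = r := by
    rw [hlen2, hr]
    conv_rhs => rw [show L = (m+1) + (L - (m+1)) by omega]
    rw [Nat.add_mod_left]
  have hne : p.take (L - r) ≠ [] := by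
    simp [hp]
    omega
  obtain ⟨x, xs, hx⟩ := List.exists_cons_of_ne_nil hne
  rw [pvMidSpec, ← hr, hx, pvChunk, ← hx]
  rw [pvMidSpec, hr2, hlen2]
  have htt : (p.take (L - r)).take (m+1) = p.take (m+1) := by
    rw [List.take_take, Nat.min_eq_left hBge]
  have htd : (p.take (L - r)).drop (m+1) = (p.drop (m+1)).take (L - (m+1) - r) := by
    rw [List.drop_take]
    congr 1
    omega
  have hdd : p.drop (L - r) = (p.drop (m+1)).drop (L - (m+1) - r) := by
    rw [List.drop_drop]
    congr 1
    omega
  rw [htt, htd, hdd]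
  simp [List.cons_append]

theorem pvASpec_app (m : Nat) : ∀ (k : Nat) (p rest : List Char), p.length ≤ k → ' ' ∉ p →
    pvASpec m (p ++ ' ' :: rest) = pvMidSpec m p ++ String.ofList [' '] :: pvASpec m rest := by
  intro k
  induction k with
  | zero =>
    intro p rest hlen _
    obtain rfl : p = [] := List.eq_nil_of_length_eq_zero (by omega)
    rw [List.nil_append, pvASpec, if_pos rfl]
    rw [pvMid_small m [] (by simp)]
    simp
  | succ k ih =>
    intro p rest hlen hsp
    match p with
    | [] =>
      rw [List.nil_append, pvASpec, if_pos rfl]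
      rw [pvMid_small m [] (by simp)]
      simp
    | c :: p' =>
      have hc : ¬ c = ' ' := fun hh => hsp (hh ▸ List.mem_cons_self)
      by_cases hbig : m + 1 ≤ (c :: p').length
      · have htake : ((c :: p') ++ ' ' :: rest).take (m+1) = (c :: p').take (m+1) :=
          List.take_append_of_le_length hbig
        have hnos : ' ' ∉ ((c :: p') ++ ' ' :: rest).take (m+1) := by
          rw [htake]
          exact fun hm => hsp (List.mem_of_mem_take hm)
        have hdrop : ((c :: p') ++ ' ' :: rest).drop (m+1) = (c :: p').drop (m+1) ++ ' ' :: rest :=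
          List.drop_append_of_le_length hbig
        rw [show (c :: p') ++ ' ' :: rest = c :: (p' ++ ' ' :: rest) from rfl]
        rw [pvASpec, if_neg hc]
        rw [show (c :: (p' ++ ' ' :: rest)) = (c :: p') ++ ' ' :: rest from rfl]
        rw [if_neg hnos]
        rw [hdrop]
        rw [ih _ rest (by simp only [List.length_drop, List.length_cons] at hlen ⊢; omega) (fun hm => hsp (List.mem_of_mem_drop hm))]
        rw [htake, pvMid_cons m c p' hbig]
        simp
      · have hsmall : (c :: p').length ≤ m := by omega
        have hmem : ' ' ∈ ((c :: p') ++ ' ' :: rest).take (m+1) := by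
          rw [List.take_append]
          apply List.mem_append_right
          rw [show m + 1 - (c :: p').length = (m - (c :: p').length) + 1 by omega]
          rw [List.take_succ_cons]
          exact List.mem_cons_self
        rw [show (c :: p') ++ ' ' :: rest = c :: (p' ++ ' ' :: rest) from rfl]
        rw [pvASpec, if_neg hc]
        rw [show (c :: (p' ++ ' ' :: rest)) = (c :: p') ++ ' ' :: rest from rfl]
        rw [if_pos hmem]
        rw [ih p' rest (by simp only [List.length_cons] at hlen; omega) (fun hm => hsp (List.mem_cons_of_mem _ hm))]
        rw [pvMid_small m (c :: p') hsmall]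
        rw [pvMid_small m p' (by simp only [List.length_cons] at hsmall; omega)]
        simp

theorem pvMain_eq (m : Nat) : ∀ (k : Nat) (cs : List Char), cs.length ≤ k →
    pvASpec m cs = pvJoin m (pvSplit cs) := by
  intro k
  induction k with
  | zero =>
    intro cs hlen
    obtain rfl : cs = [] := List.eq_nil_of_length_eq_zero (by omega)
    rw [pvASpec, pvSplit, pvJoin, pvChunk]
  | succ k ih =>
    intro cs hlen
    by_cases hsp : ' ' ∈ cs
    · set pr : Char → Bool := fun c => !(c == ' ') with hpr
      have hsplit := List.takeWhile_append_dropWhile (p := pr) (l := cs)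
      have hnosp : ' ' ∉ cs.takeWhile pr := by
        intro hm
        have := List.mem_takeWhile_imp hm
        simp [hpr] at this
      have hd : cs.dropWhile pr ≠ [] := by
        intro h0
        apply hnosp
        rw [← hsplit, h0, List.append_nil] at hsp
        exact hsp
      have hhead : pr ((cs.dropWhile pr).head hd) = false := List.head_dropWhile_not pr hd
      obtain ⟨x, rest, hx⟩ := List.exists_cons_of_ne_nil hd
      have hx0 : (cs.dropWhile pr).head hd = x := by simp [hx]
      have hx1 : pr x = false := hx0 ▸ hhead
      have hx' : x = ' ' := by
        simp only [hpr, Bool.not_eq_false', beq_iff_eq] at hx1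
        exact hx1
      have hcons : cs.dropWhile pr = ' ' :: rest := hx' ▸ hx
      set p := cs.takeWhile pr with hpdef
      have hcs : cs = p ++ ' ' :: rest := by
        rw [← hsplit, hcons]
      have hlenrest : rest.length ≤ k := by
        have : cs.length = p.length + 1 + rest.length := by
          rw [hcs]
          simp only [List.length_append, List.length_cons]
          omega
        omega
      rw [hcs]
      rw [pvASpec_app m p.length p rest le_rfl hnosp]
      rw [pvSplit_append p rest hnosp]
      obtain ⟨q, qs, hq⟩ := List.exists_cons_of_ne_nil (pvSplit_ne_nil rest)
      rw [hq, pvJoin, ← hq]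
      rw [ih rest hlenrest]
    · rw [pvSplit_nospace cs hsp, pvJoin]
      exact pvASpec_nospace m cs.length cs (by omega) hsp

-- n < 0 on an all-space string: A appends each space one by one
theorem pvALoop_allspace (cs : List Char) (n : Int) (hall : ∀ c ∈ cs, c = ' ') :
    ∀ (fuel i : Nat) (acc : List String), cs.length ≤ fuel + i →
    pvALoop cs n fuel i acc = acc.reverse ++ (cs.drop i).map (fun c => String.ofList [c]) := by
  intro fuel
  induction fuel with
  | zero =>
    intro i acc h
    rw [pvALoop, List.drop_eq_nil_of_le (by omega)]
    simp
  | succ fuel ih =>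
    intro i acc h
    rw [pvALoop]
    by_cases hi : i < cs.length
    · rw [dif_pos hi, if_pos (hall _ (List.getElem_mem hi))]
      rw [ih (i+1) _ (by omega), List.drop_eq_getElem_cons hi, List.map_cons]
      simp
    · rw [dif_neg hi, List.drop_eq_nil_of_le (by omega)]
      simp

theorem pvSplit_allspace (cs : List Char) (hall : ∀ c ∈ cs, c = ' ') :
    pvSplit cs = List.replicate (cs.length + 1) [] := by
  induction cs with
  | nil => rfl
  | cons c cs ih =>
    rw [pvSplit, if_pos (hall _ List.mem_cons_self)]
    rw [ih (fun x hx => hall _ (List.mem_cons_of_mem _ hx))]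
    rfl

theorem pvB_foldl_empty (n : Int) : ∀ (L : Nat) (out : List String),
    (List.replicate L ([] : List Char)).foldl
      (fun out part =>
        ((out ++ pvNgramSlices part ((part.length : Int) - PySem.Int.mod (part.length : Int) n) n)
            ++ (PySem.List.slice part (some ((part.length : Int) - PySem.Int.mod (part.length : Int) n)) none).map
                (fun c => String.ofList [c]))
          ++ [String.ofList [' ']]) out
      = out ++ List.replicate L (String.ofList [' ']) := by
  intro L
  induction L with
  | zero => intro out; simp
  | succ L ih =>
    intro out
    rw [List.replicate_succ, List.foldl_cons, ih]
    have h1 : pvNgramSlices ([] : List Char) ((0 : Int) - PySem.Int.mod (0 : Int) n) n = [] := by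
      simp [pvNgramSlices, PySem.Int.mod, PySem.List.pyRange]
    have h2 : PySem.List.slice ([] : List Char) (some ((0 : Int) - PySem.Int.mod (0 : Int) n)) none = ([] : List Char) := by
      simp [PySem.List.slice_some_none]
    simp only [List.length_nil, Nat.cast_zero, h1, h2, List.map_nil, List.append_nil]
    rw [List.replicate_succ]
    simp

theorem pvB_neg (s : String) (n : Int) (hall : ∀ c ∈ s.toList, c = ' ') :
    string_to_ngrams_sep_wspace_alt s n = s.toList.map (fun c => String.ofList [c]) := by
  unfold string_to_ngrams_sep_wspace_alt
  rw [pvSplitOn_eq, pvSplit_allspace _ hall]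
  simp only []
  rw [PySem.List.slice_to_neg_one]
  rw [pvGetNegOne _ (by simp)]
  rw [List.replicate_succ', List.dropLast_concat, List.getLast?_concat]
  rw [pvB_foldl_empty]
  have hlast : pvNgramSlices ([] : List Char) ((List.length ([] : List Char) : Int)) n = [] := by
    simp [pvNgramSlices, PySem.List.pyRange]
  simp only [hlast, List.append_nil, List.nil_append]
  have hmap : s.toList.map (fun c => String.ofList [c]) = s.toList.map (fun _ => String.ofList [' ']) :=
    List.map_congr_left (fun c hc => by rw [hall c hc])
  rw [hmap, List.map_const']

-- ===== VERDICT (by name: the statement is the Claim_ definition above) =====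
theorem string_to_ngrams_sep_wspace_spec : Claim_equal_string_to_ngrams_sep_wspace := by
  intro s n _ hpre
  unfold Spec_string_to_ngrams_sep_wspace
  unfold Pre_string_to_ngrams_sep_wspace at hpre
  rcases hpre with hpos | ⟨hneg, hall⟩
  · have hm : n = (((n.toNat - 1 : Nat)) : Int) + 1 := by omega
    rw [hm, pvA_main, pvB_main, pvMain_eq _ s.toList.length s.toList le_rfl]
  · rw [pvB_neg s n hall]
    unfold string_to_ngrams_sep_wspace
    rw [pvALoop_allspace s.toList n hall s.toList.length 0 [] (by omega)]
    simp
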